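-- pv_equiv track=rewrite | github.com/Fajar2k5/Algeo02-23027 | service/midi_processor.py | shrink_rtb_ftb_histogram
-- ===== SOURCE A (Python) =====
-- def fuzzy_histogram(hist):
--     fuzzy = hist[:]
--     for i in range(1, len(hist) - 1):
--         fuzzy[i] *= 2
--         fuzzy[i] += hist[i - 1] + hist[i + 1]
--     return fuzzy
--
-- def shrink_rtb_ftb_histogram(hist):
--     hist = fuzzy_histogram(hist)
--
--     # Define the center (128 in the shifted representation)
--     center = 128
--     left = center - 12
--     right = center + 12
--
--     # Initialize reduced histogram
--     reduced_hist = [0] * 25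
--
--     for i in range(len(hist)):
--         if i < left:
--             reduced_hist[0] += hist[i]  # Merge into leftmost bin (-12)
--         elif i > right:
--             reduced_hist[-1] += hist[i]  # Merge into rightmost bin (+12)
--         else:
--             reduced_hist[i - left] += hist[i]  # Map within range
--
--     # Normalize the reduced histogram
--     return reduced_hist
-- ===== SOURCE B (Python) =====
-- def _bin(k):
--     # bin index that smoothed slot k falls into: 0 for k <= 116, 24 for k >= 140, else k - 116
--     if k < 116:
--         return 0
--     if k > 140:
--         return 24
--     return k - 116
--
--
-- def shrink_rtb_ftb_histogram(hist):
--     # Scatter: never build the smoothed histogram. Each hist[i] contributes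
--     # 2*hist[i] to the bin of slot i when i is interior (else 1*hist[i]),
--     # and hist[i] to the bins of the neighbouring interior slots i-1 and i+1.
--     n = len(hist)
--     reduced = [0] * 25
--     for i in range(n):
--         v = hist[i]
--         w = 2 if 0 < i < n - 1 else 1
--         reduced[_bin(i)] += w * v
--         if 0 < i - 1 < n - 1:
--             reduced[_bin(i - 1)] += v
--         if i + 1 < n - 1:
--             reduced[_bin(i + 1)] += v
--     return reduced
-- ===== Notes on version B (the rewrite author's own statement) =====
-- stated objective: alternative
-- what changed: Replaces A's two-stage gather (build the smoothed fuzzy list in place, then bucket each smoothed slot into 25 bins with a 3-way branch) by a one-stage scatter that never materialises the smoothed histogram: a single pass over the original data in which each element deposits its 1-2-1 convolution contributions (weight 2 to its own slot's bin when interior, weight 1 to the bins of the neighbouring interior slots) directly into the 25 bins.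
import Mathlib
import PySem

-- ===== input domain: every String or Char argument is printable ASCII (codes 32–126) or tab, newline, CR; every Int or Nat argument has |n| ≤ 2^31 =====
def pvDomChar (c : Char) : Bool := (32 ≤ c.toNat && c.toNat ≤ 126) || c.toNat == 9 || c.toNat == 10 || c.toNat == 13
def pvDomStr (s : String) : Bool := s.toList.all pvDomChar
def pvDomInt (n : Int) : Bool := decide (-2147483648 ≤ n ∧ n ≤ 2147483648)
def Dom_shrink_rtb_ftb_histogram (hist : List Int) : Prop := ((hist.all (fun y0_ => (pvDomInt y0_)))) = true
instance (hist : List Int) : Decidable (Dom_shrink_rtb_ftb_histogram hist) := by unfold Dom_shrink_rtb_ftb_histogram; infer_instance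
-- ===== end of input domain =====

-- B replaces A's two-stage gather (smooth into a fuzzy list, then bucket its slots) by a
-- single-pass scatter over the original data that never builds the smoothed list
-- (objective: alternative).

-- ===== PORT A =====
-- helper fuzzy_histogram, ported step for step; the loop indices i, i-1, i+1 are always
-- in range, so getD/set are exact renderings of Python's fuzzy[i] / hist[i±1].
def fuzzy_histogram (hist : List Int) : List Int :=
  (PySem.List.pyRange 1 ((hist.length : Int) - 1) 1).foldl
    (fun fuzzy i =>
      -- fuzzy[i] *= 2 ; fuzzy[i] += hist[i-1] + hist[i+1]
      fuzzy.set i.toNat (fuzzy.getD i.toNat 0 * 2 + (hist.getD (i - 1).toNat 0 + hist.getD (i + 1).toNat 0)))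
    hist

-- reduced_hist[-1] is index 24 of the 25-element list; i and i-left are in range in
-- their branches, so set/getD are exact.
def shrink_rtb_ftb_histogram (hist : List Int) : List Int :=
  let h := fuzzy_histogram hist
  let center : Int := 128
  let left : Int := center - 12
  let right : Int := center + 12
  (PySem.List.pyRange 0 (h.length : Int) 1).foldl
    (fun red i =>
      if i < left then red.set 0 (red.getD 0 0 + h.getD i.toNat 0)
      else if i > right then red.set 24 (red.getD 24 0 + h.getD i.toNat 0)
      else red.set (i - left).toNat (red.getD (i - left).toNat 0 + h.getD i.toNat 0))
    (List.replicate 25 0)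

-- ===== PORT B =====
-- Source B's helper _bin(k): bin of smoothed slot k
def pvBin (k : Nat) : Nat :=
  if k < 116 then 0 else if 140 < k then 24 else k - 116

-- the body of Source B's loop (i, v, w and the three bin deposits), transliterated;
-- loop indices i are nonnegative, so Nat arithmetic (i-1 with the 0 < i-1 guard,
-- n-1 under i < n which forces n ≥ 1) matches Python's exactly.
def pvB1 (hist : List Int) (n : Nat) (red : List Int) (i : Nat) : List Int :=
  red.set (pvBin i) (red.getD (pvBin i) 0 + (if 0 < i ∧ i < n - 1 then (2:Int) else 1) * hist.getD i 0)

def pvB2 (hist : List Int) (n : Nat) (red : List Int) (i : Nat) : List Int :=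
  if 0 < i - 1 ∧ i - 1 < n - 1 then red.set (pvBin (i - 1)) (red.getD (pvBin (i - 1)) 0 + hist.getD i 0) else red

def pvB3 (hist : List Int) (n : Nat) (red : List Int) (i : Nat) : List Int :=
  if i + 1 < n - 1 then red.set (pvBin (i + 1)) (red.getD (pvBin (i + 1)) 0 + hist.getD i 0) else red

def pvBStep (hist : List Int) (n : Nat) (red : List Int) (i : Nat) : List Int :=
  pvB3 hist n (pvB2 hist n (pvB1 hist n red i) i) i

def shrink_rtb_ftb_histogram_alt (hist : List Int) : List Int :=
  (PySem.List.pyRange 0 (hist.length : Int) 1).foldl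
    (fun red i => pvBStep hist hist.length red i.toNat)
    (List.replicate 25 0)

-- ===== PRECONDITION & SPEC =====
def Spec_shrink_rtb_ftb_histogram (hist : List Int) (out : List Int) : Prop := out = shrink_rtb_ftb_histogram_alt hist
instance (hist : List Int) (out : List Int) : Decidable (Spec_shrink_rtb_ftb_histogram hist out) := by unfold Spec_shrink_rtb_ftb_histogram; infer_instance

-- ===== CLAIM (what is proved, stated in full; the proofs are below) =====
def Claim_equal_shrink_rtb_ftb_histogram : Prop := ∀ (hist : List Int), Dom_shrink_rtb_ftb_histogram hist → Spec_shrink_rtb_ftb_histogram hist (shrink_rtb_ftb_histogram hist)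

-- ===== LEMMAS AND PROOFS =====

-- generic getD/set facts ---------------------------------------------------

lemma pv_getD_set (l : List Int) (i j : Nat) (v : Int) (_hi : i < l.length) (hj : j < l.length) :
    (l.set i v).getD j 0 = if i = j then v else l.getD j 0 := by
  rw [List.getD_eq_getElem _ 0 (by simpa using hj), List.getElem_set]
  split_ifs with hij
  · rfl
  · rw [List.getD_eq_getElem _ 0 hj]

lemma pv_add_at (l : List Int) (b j : Nat) (v : Int) (hb : b < l.length) (hj : j < l.length) :
    (l.set b (l.getD b 0 + v)).getD j 0 = l.getD j 0 + (if b = j then v else 0) := by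
  rw [pv_getD_set l b j _ hb hj]
  split_ifs with h
  · rw [h]
  · ring

lemma pvBin_lt (k : Nat) : pvBin k < 25 := by
  unfold pvBin; split_ifs <;> omega

lemma pvBin_eq_zero (k : Nat) : pvBin k = 0 ↔ k < 117 := by
  unfold pvBin
  split_ifs with h1 h2
  · exact ⟨fun _ => by omega, fun _ => rfl⟩
  · exact ⟨fun h => h.elim, fun h => by omega⟩
  · exact ⟨fun h => by omega, fun h => by omega⟩

lemma pvBin_eq_24 (k : Nat) : pvBin k = 24 ↔ 140 ≤ k := by
  unfold pvBin
  split_ifs with h1 h2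
  · exact ⟨fun h => h.elim, fun h => by omega⟩
  · exact ⟨fun _ => by omega, fun _ => rfl⟩
  · exact ⟨fun h => by omega, fun h => by omega⟩

lemma pvBin_eq_mid (k j : Nat) (hj : j < 25) (hj0 : j ≠ 0) (hj24 : j ≠ 24) :
    pvBin k = j ↔ k = 116 + j := by
  unfold pvBin
  split_ifs with h1 h2
  · exact ⟨fun h => by omega, fun h => by omega⟩
  · exact ⟨fun h => by omega, fun h => by omega⟩
  · exact ⟨fun h => by omega, fun h => by omega⟩

-- the common value: what bin j holds after the first n smoothed slots are bucketed ------

def pvExpected (h : List Int) (n j : Nat) : Int :=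
  if j = 0 then ∑ k ∈ Finset.range n, (if k < 117 then h.getD k 0 else 0)
  else if j = 24 then ∑ k ∈ Finset.range n, (if 140 ≤ k then h.getD k 0 else 0)
  else if 116 + j < n then h.getD (116 + j) 0 else 0

lemma pvExpected_succ (h : List Int) (n j : Nat) (hj : j < 25) :
    pvExpected h (n + 1) j = pvExpected h n j + (if pvBin n = j then h.getD n 0 else 0) := by
  unfold pvExpected
  by_cases hj0 : j = 0
  · subst hj0
    rw [if_pos rfl, if_pos rfl, Finset.sum_range_succ]
    congr 1
    by_cases h117 : n < 117
    · rw [if_pos h117, if_pos ((pvBin_eq_zero n).2 h117)]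
    · rw [if_neg h117, if_neg (fun hc => h117 ((pvBin_eq_zero n).1 hc))]
  · by_cases hj24 : j = 24
    · subst hj24
      rw [if_neg hj0, if_neg hj0, if_pos rfl, if_pos rfl, Finset.sum_range_succ]
      congr 1
      by_cases h140 : 140 ≤ n
      · rw [if_pos h140, if_pos ((pvBin_eq_24 n).2 h140)]
      · rw [if_neg h140, if_neg (fun hc => h140 ((pvBin_eq_24 n).1 hc))]
    · rw [if_neg hj0, if_neg hj0, if_neg hj24, if_neg hj24]
      by_cases hn : n = 116 + j
      · rw [if_pos (by omega), if_neg (by omega), if_pos ((pvBin_eq_mid n j hj hj0 hj24).2 hn), ← hn]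
        ring
      · rw [if_neg (fun hc => hn (((pvBin_eq_mid n j hj hj0 hj24)).1 hc)), add_zero]
        by_cases hlt : 116 + j < n
        · rw [if_pos (by omega), if_pos hlt]
        · rw [if_neg (by omega), if_neg hlt]

-- A side: the bucketing loop, rephrased over Nat indices --------------------------------

def pvStep (h red : List Int) (k : Nat) : List Int :=
  if k < 116 then red.set 0 (red.getD 0 0 + h.getD k 0)
  else if 140 < k then red.set 24 (red.getD 24 0 + h.getD k 0)
  else red.set (k - 116) (red.getD (k - 116) 0 + h.getD k 0)

def pvLoop (h : List Int) (n : Nat) : List Int := (List.range n).foldl (pvStep h) (List.replicate 25 0)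

lemma pvStep_len (h red : List Int) (k : Nat) : (pvStep h red k).length = red.length := by
  unfold pvStep; split_ifs <;> simp

lemma pv_A_eq_loop (hist : List Int) :
    shrink_rtb_ftb_histogram hist = pvLoop (fuzzy_histogram hist) (fuzzy_histogram hist).length := by
  unfold shrink_rtb_ftb_histogram pvLoop
  dsimp only
  rw [PySem.List.pyRange_one]
  rw [List.foldl_map]
  have hn : ((fuzzy_histogram hist).length : Int) - 0 = ((fuzzy_histogram hist).length : Int) := by ring
  rw [hn, Int.toNat_natCast]
  congr 1
  funext red k
  have h1 : ((0:Int) + (k:Int)).toNat = k := by omega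
  have h2 : ((0:Int) + (k:Int) - (128 - 12)).toNat = k - 116 := by omega
  simp only [pvStep, h1, h2]
  split_ifs <;> first | rfl | (exfalso; omega)

lemma pv_loop_len (h : List Int) (n : Nat) : (pvLoop h n).length = 25 := by
  induction n with
  | zero => rfl
  | succ n ih =>
    unfold pvLoop at *
    rw [List.range_succ, List.foldl_append]
    simp only [List.foldl_cons, List.foldl_nil]
    rw [pvStep_len, ih]

lemma pvStep_getD (h red : List Int) (k j : Nat) (hred : red.length = 25) (hj : j < 25) :
    (pvStep h red k).getD j 0 = red.getD j 0 + (if pvBin k = j then h.getD k 0 else 0) := by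
  unfold pvStep
  by_cases c1 : k < 116
  · rw [if_pos c1, pv_add_at red 0 j _ (by omega) (by omega)]
    have hb : pvBin k = 0 := (pvBin_eq_zero k).2 (by omega)
    rw [hb]
  · by_cases c2 : 140 < k
    · rw [if_neg c1, if_pos c2, pv_add_at red 24 j _ (by omega) (by omega)]
      have hb : pvBin k = 24 := (pvBin_eq_24 k).2 (by omega)
      rw [hb]
    · rw [if_neg c1, if_neg c2, pv_add_at red (k - 116) j _ (by omega) (by omega)]
      have hb : pvBin k = k - 116 := by unfold pvBin; rw [if_neg c1, if_neg c2]
      rw [hb]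

lemma pv_loop_getD (h : List Int) (n j : Nat) (hj : j < 25) :
    (pvLoop h n).getD j 0 = pvExpected h n j := by
  induction n with
  | zero =>
    simp only [pvLoop, List.range_zero, List.foldl_nil]
    rw [List.getD_eq_getElem _ 0 (by simpa using hj), List.getElem_replicate]
    unfold pvExpected
    split_ifs <;> first | omega | simp
  | succ n ih =>
    have hstep : pvLoop h (n + 1) = pvStep h (pvLoop h n) n := by
      unfold pvLoop; rw [List.range_succ, List.foldl_append]; rfl
    rw [hstep, pvStep_getD h _ n j (pv_loop_len h n) hj, ih, pvExpected_succ h n j hj]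

-- A side: the fuzzy list, characterised pointwise ---------------------------------------

def pvFStep (hist fz : List Int) (k : Nat) : List Int :=
  fz.set (k + 1) (fz.getD (k + 1) 0 * 2 + (hist.getD k 0 + hist.getD (k + 2) 0))

def pvFLoop (hist : List Int) (m : Nat) : List Int := (List.range m).foldl (pvFStep hist) hist

lemma pv_floop_len (hist : List Int) (m : Nat) : (pvFLoop hist m).length = hist.length := by
  induction m with
  | zero => rfl
  | succ m ih => unfold pvFLoop at *; rw [List.range_succ, List.foldl_append]; simp [pvFStep, ih]

lemma pv_floop_getD (hist : List Int) (m i : Nat) (hm : m ≤ hist.length - 2) (hi : i < hist.length) :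
    (pvFLoop hist m).getD i 0 =
      if 1 ≤ i ∧ i ≤ m then hist.getD i 0 * 2 + (hist.getD (i - 1) 0 + hist.getD (i + 1) 0)
      else hist.getD i 0 := by
  induction m generalizing i with
  | zero =>
    simp only [pvFLoop, List.range_zero, List.foldl_nil]
    rw [if_neg (by omega)]
  | succ m ih =>
    have hstep : pvFLoop hist (m + 1) = pvFStep hist (pvFLoop hist m) m := by
      unfold pvFLoop; rw [List.range_succ, List.foldl_append]; rfl
    have hlen := pv_floop_len hist m
    rw [hstep]
    unfold pvFStep
    rw [pv_getD_set (pvFLoop hist m) (m + 1) i _ (by omega) (by omega)]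
    by_cases hsel : m + 1 = i
    · rw [if_pos hsel, ← hsel, if_pos (by omega)]
      rw [ih (m + 1) (by omega) (by omega), if_neg (by omega)]
      simp
    · rw [if_neg hsel, ih i (by omega) hi]
      split_ifs with a b <;> first | rfl | (exfalso; omega)

lemma pv_fuzzyA_eq_floop (hist : List Int) : fuzzy_histogram hist = pvFLoop hist (hist.length - 2) := by
  unfold fuzzy_histogram pvFLoop
  rw [PySem.List.pyRange_one, List.foldl_map]
  have hn : ((hist.length : Int) - 1 - 1).toNat = hist.length - 2 := by omega
  rw [hn]
  congr 1
  funext fz k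
  have h1 : ((1:Int) + k).toNat = k + 1 := by omega
  have h2 : ((1:Int) + k - 1).toNat = k := by omega
  have h3 : ((1:Int) + k + 1).toNat = k + 2 := by omega
  rw [h1, h2, h3]; rfl

lemma pv_fuzzy_len (hist : List Int) : (fuzzy_histogram hist).length = hist.length := by
  rw [pv_fuzzyA_eq_floop]; exact pv_floop_len hist _

-- closed form of the smoothed slot k (for k < hist.length)
def pvFuzzyD (hist : List Int) (n k : Nat) : Int :=
  if 0 < k ∧ k < n - 1 then 2 * hist.getD k 0 + (hist.getD (k - 1) 0 + hist.getD (k + 1) 0)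
  else hist.getD k 0

lemma pv_fuzzy_getD (hist : List Int) (k : Nat) (hk : k < hist.length) :
    (fuzzy_histogram hist).getD k 0 = pvFuzzyD hist hist.length k := by
  rw [pv_fuzzyA_eq_floop, pv_floop_getD hist (hist.length - 2) k (by omega) hk]
  unfold pvFuzzyD
  by_cases hc : 0 < k ∧ k < hist.length - 1
  · rw [if_pos (by omega : 1 ≤ k ∧ k ≤ hist.length - 2), if_pos hc]
    ring
  · rw [if_neg (fun h => hc (by omega)), if_neg hc]

-- B side: the scatter loop -------------------------------------------------------------

def pvBLoop (hist : List Int) (m : Nat) : List Int :=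
  (List.range m).foldl (pvBStep hist hist.length) (List.replicate 25 0)

-- contribution of hist[i] to bin j in one B-step
def pvC (hist : List Int) (n i j : Nat) : Int :=
  (if pvBin i = j then (if 0 < i ∧ i < n - 1 then (2:Int) else 1) * hist.getD i 0 else 0)
  + (if 0 < i - 1 ∧ i - 1 < n - 1 ∧ pvBin (i - 1) = j then hist.getD i 0 else 0)
  + (if i + 1 < n - 1 ∧ pvBin (i + 1) = j then hist.getD i 0 else 0)

lemma pvB1_len (hist : List Int) (n : Nat) (red : List Int) (i : Nat) :
    (pvB1 hist n red i).length = red.length := by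
  unfold pvB1; simp

lemma pvB2_len (hist : List Int) (n : Nat) (red : List Int) (i : Nat) :
    (pvB2 hist n red i).length = red.length := by
  unfold pvB2; split_ifs <;> simp

lemma pvB3_len (hist : List Int) (n : Nat) (red : List Int) (i : Nat) :
    (pvB3 hist n red i).length = red.length := by
  unfold pvB3; split_ifs <;> simp

lemma pvBStep_len (hist : List Int) (n : Nat) (red : List Int) (i : Nat) :
    (pvBStep hist n red i).length = red.length := by
  unfold pvBStep; rw [pvB3_len, pvB2_len, pvB1_len]

lemma pvB1_getD (hist : List Int) (n : Nat) (red : List Int) (i j : Nat)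
    (hred : red.length = 25) (hj : j < 25) :
    (pvB1 hist n red i).getD j 0
      = red.getD j 0 + (if pvBin i = j then (if 0 < i ∧ i < n - 1 then (2:Int) else 1) * hist.getD i 0 else 0) := by
  unfold pvB1
  rw [pv_add_at red (pvBin i) j _ (by rw [hred]; exact pvBin_lt i) (by omega)]

lemma pvB2_getD (hist : List Int) (n : Nat) (red : List Int) (i j : Nat)
    (hred : red.length = 25) (hj : j < 25) :
    (pvB2 hist n red i).getD j 0
      = red.getD j 0 + (if 0 < i - 1 ∧ i - 1 < n - 1 ∧ pvBin (i - 1) = j then hist.getD i 0 else 0) := by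
  unfold pvB2
  by_cases hc : 0 < i - 1 ∧ i - 1 < n - 1
  · rw [if_pos hc, pv_add_at red (pvBin (i - 1)) j _ (by rw [hred]; exact pvBin_lt _) (by omega)]
    congr 1
    by_cases hb : pvBin (i - 1) = j
    · rw [if_pos hb, if_pos ⟨hc.1, hc.2, hb⟩]
    · rw [if_neg hb, if_neg (fun h => hb h.2.2)]
  · rw [if_neg hc, if_neg (fun h => hc ⟨h.1, h.2.1⟩), add_zero]

lemma pvB3_getD (hist : List Int) (n : Nat) (red : List Int) (i j : Nat)
    (hred : red.length = 25) (hj : j < 25) :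
    (pvB3 hist n red i).getD j 0
      = red.getD j 0 + (if i + 1 < n - 1 ∧ pvBin (i + 1) = j then hist.getD i 0 else 0) := by
  unfold pvB3
  by_cases hc : i + 1 < n - 1
  · rw [if_pos hc, pv_add_at red (pvBin (i + 1)) j _ (by rw [hred]; exact pvBin_lt _) (by omega)]
    congr 1
    by_cases hb : pvBin (i + 1) = j
    · rw [if_pos hb, if_pos ⟨hc, hb⟩]
    · rw [if_neg hb, if_neg (fun h => hb h.2)]
  · rw [if_neg hc, if_neg (fun h => hc h.1), add_zero]

lemma pvBStep_getD (hist : List Int) (n : Nat) (red : List Int) (i j : Nat)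
    (hred : red.length = 25) (hj : j < 25) :
    (pvBStep hist n red i).getD j 0 = red.getD j 0 + pvC hist n i j := by
  unfold pvBStep pvC
  rw [pvB3_getD hist n _ i j (by rw [pvB2_len, pvB1_len, hred]) hj,
    pvB2_getD hist n _ i j (by rw [pvB1_len, hred]) hj,
    pvB1_getD hist n red i j hred hj]
  ring

lemma pv_B_eq_loop (hist : List Int) :
    shrink_rtb_ftb_histogram_alt hist = pvBLoop hist hist.length := by
  unfold shrink_rtb_ftb_histogram_alt pvBLoop
  rw [PySem.List.pyRange_one, List.foldl_map]
  have hn : ((hist.length : Int) - 0).toNat = hist.length := by omega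
  rw [hn]
  congr 1
  funext red k
  have h1 : ((0:Int) + (k:Int)).toNat = k := by omega
  rw [h1]

lemma pvBLoop_len (hist : List Int) (m : Nat) : (pvBLoop hist m).length = 25 := by
  induction m with
  | zero => rfl
  | succ m ih =>
    unfold pvBLoop at *
    rw [List.range_succ, List.foldl_append]
    simp only [List.foldl_cons, List.foldl_nil]
    rw [pvBStep_len, ih]

lemma pvBLoop_getD (hist : List Int) (m j : Nat) (hj : j < 25) :
    (pvBLoop hist m).getD j 0 = ∑ i ∈ Finset.range m, pvC hist hist.length i j := by
  induction m with
  | zero =>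
    simp only [pvBLoop, List.range_zero, List.foldl_nil, Finset.range_zero, Finset.sum_empty]
    rw [List.getD_eq_getElem _ 0 (by simpa using hj), List.getElem_replicate]
  | succ m ih =>
    have hstep : pvBLoop hist (m + 1) = pvBStep hist hist.length (pvBLoop hist m) m := by
      unfold pvBLoop; rw [List.range_succ, List.foldl_append]; rfl
    rw [hstep, pvBStep_getD hist _ _ m j (pvBLoop_len hist m) hj, ih, Finset.sum_range_succ]

-- the scatter sum equals the gather sum ------------------------------------------------

lemma pv_sum_shift (f g : Nat → Int) (n : Nat) (hf0 : f 0 = 0)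
    (hfg : ∀ i, f (i + 1) = g i) (hg : ∀ m, n = m + 1 → g m = 0) :
    ∑ i ∈ Finset.range n, f i = ∑ i ∈ Finset.range n, g i := by
  cases n with
  | zero => rfl
  | succ m =>
    rw [Finset.sum_range_succ', Finset.sum_range_succ, hf0, hg m rfl, add_zero, add_zero]
    exact Finset.sum_congr rfl (fun i _ => hfg i)

lemma pv_sum_c_eq (hist : List Int) (j : Nat) :
    ∑ i ∈ Finset.range hist.length, pvC hist hist.length i j
      = ∑ k ∈ Finset.range hist.length,
          (if pvBin k = j then pvFuzzyD hist hist.length k else 0) := by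
  have hsplit : ∀ k, (if pvBin k = j then pvFuzzyD hist hist.length k else 0)
      = (if pvBin k = j then (if 0 < k ∧ k < hist.length - 1 then (2:Int) else 1) * hist.getD k 0 else 0)
        + (if (0 < k ∧ k < hist.length - 1) ∧ pvBin k = j then hist.getD (k + 1) 0 else 0)
        + (if (0 < k ∧ k < hist.length - 1) ∧ pvBin k = j then hist.getD (k - 1) 0 else 0) := by
    intro k
    unfold pvFuzzyD
    split_ifs <;> first | tauto | ring
  unfold pvC
  rw [Finset.sum_congr rfl (fun k _ => hsplit k), Finset.sum_add_distrib, Finset.sum_add_distrib,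
    Finset.sum_add_distrib, Finset.sum_add_distrib]
  congr 1
  · congr 1
    -- deposit into slot (i-1)'s bin ↔ slot k's right-neighbour term, shifted by one
    refine pv_sum_shift _ _ _ (by rw [if_neg (fun h => by omega)]) (fun i => ?_)
      (fun m hm => by rw [if_neg (fun h => by omega)])
    have h1 : i + 1 - 1 = i := by omega
    rw [h1]
    by_cases hc : (0 < i ∧ i < hist.length - 1) ∧ pvBin i = j
    · rw [if_pos ⟨hc.1.1, hc.1.2, hc.2⟩, if_pos hc]
    · rw [if_neg (fun h => hc ⟨⟨h.1, h.2.1⟩, h.2.2⟩), if_neg hc]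
  · -- deposit into slot (i+1)'s bin ↔ slot k's left-neighbour term, shifted the other way
    refine (pv_sum_shift _ _ _ (by rw [if_neg (fun h => by omega)]) (fun i => ?_)
      (fun m hm => by rw [if_neg (fun h => by omega)])).symm
    have h1 : i + 1 - 1 = i := by omega
    by_cases hc : i + 1 < hist.length - 1 ∧ pvBin (i + 1) = j
    · rw [if_pos ⟨⟨Nat.succ_pos i, hc.1⟩, hc.2⟩, if_pos hc, h1]
    · rw [if_neg (fun h => hc ⟨h.1.2, h.2⟩), if_neg hc]

lemma pv_sum_T (hist : List Int) (j : Nat) (hj : j < 25) :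
    ∑ k ∈ Finset.range hist.length, (if pvBin k = j then pvFuzzyD hist hist.length k else 0)
      = pvExpected (fuzzy_histogram hist) hist.length j := by
  have hpt : ∀ k ∈ Finset.range hist.length,
      (if pvBin k = j then pvFuzzyD hist hist.length k else 0)
        = (if pvBin k = j then (fuzzy_histogram hist).getD k 0 else 0) := by
    intro k hk
    rw [pv_fuzzy_getD hist k (Finset.mem_range.1 hk)]
  rw [Finset.sum_congr rfl hpt]
  unfold pvExpected
  by_cases hj0 : j = 0
  · subst hj0
    rw [if_pos rfl]
    refine Finset.sum_congr rfl (fun k _ => ?_)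
    by_cases h : k < 117
    · rw [if_pos ((pvBin_eq_zero k).2 h), if_pos h]
    · rw [if_neg (fun hc => h ((pvBin_eq_zero k).1 hc)), if_neg h]
  · by_cases hj24 : j = 24
    · subst hj24
      rw [if_neg hj0, if_pos rfl]
      refine Finset.sum_congr rfl (fun k _ => ?_)
      by_cases h : 140 ≤ k
      · rw [if_pos ((pvBin_eq_24 k).2 h), if_pos h]
      · rw [if_neg (fun hc => h ((pvBin_eq_24 k).1 hc)), if_neg h]
    · rw [if_neg hj0, if_neg hj24]
      have hpt2 : ∀ k ∈ Finset.range hist.length,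
          (if pvBin k = j then (fuzzy_histogram hist).getD k 0 else 0)
            = (if k = 116 + j then (fuzzy_histogram hist).getD k 0 else 0) := by
        intro k _
        by_cases h : k = 116 + j
        · rw [if_pos ((pvBin_eq_mid k j hj hj0 hj24).2 h), if_pos h]
        · rw [if_neg (fun hc => h ((pvBin_eq_mid k j hj hj0 hj24).1 hc)), if_neg h]
      rw [Finset.sum_congr rfl hpt2, Finset.sum_ite_eq' (Finset.range hist.length) (116 + j)]
      by_cases hlt : 116 + j < hist.length
      · rw [if_pos (Finset.mem_range.2 hlt), if_pos hlt]
      · rw [if_neg (fun hc => hlt (Finset.mem_range.1 hc)), if_neg hlt]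

-- ===== VERDICT (by name: the statement is the Claim_ definition above) =====
theorem shrink_rtb_ftb_histogram_spec : Claim_equal_shrink_rtb_ftb_histogram := by
  intro hist _
  unfold Spec_shrink_rtb_ftb_histogram
  rw [pv_A_eq_loop, pv_B_eq_loop]
  apply List.ext_getElem
  · rw [pv_loop_len, pvBLoop_len]
  · intro j hj hj'
    have hj25 : j < 25 := by rw [pv_loop_len] at hj; exact hj
    have hA := pv_loop_getD (fuzzy_histogram hist) (fuzzy_histogram hist).length j hj25
    have hB := pvBLoop_getD hist hist.length j hj25
    rw [List.getD_eq_getElem _ 0 hj] at hA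
    rw [List.getD_eq_getElem _ 0 hj'] at hB
    rw [hA, hB, pv_sum_c_eq, pv_sum_T hist j hj25, pv_fuzzy_len]
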